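-- pv_equiv track=rewrite | github.com/hwan1753/algorithm | programmers/trip route.py | solution
-- ===== SOURCE A (Python) =====
-- def solution(tickets):
--
--     node_dict = {}      # 노드 hash화
--     # 출발지를 key로 도착지를 value로 지정.
--     for city in tickets:
--         # dict.get(a,b) = dict에서 key가 a인 것을 찾고 없으면 b값을 넣겠다.
--         node_dict[city[0]] = node_dict.get(city[0], []) + [city[1]]
--
--     # 알파벳 역순으로 정렬
--     for city in node_dict:
--         node_dict[city] = sorted(node_dict[city], reverse=True)
--
--
--     stack = ["ICN"]
--     answer = []
--
--     # 스택에 값이 있는동안 계속 반복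
--     while stack:
--         now_city = stack[-1]
--         # 만약 해당 도시 출발 항공표가 없을 때 answer에 추가.
--         if now_city not in node_dict or node_dict[now_city] == []:
--             answer.append(stack.pop())
--         else:
--             # 해당 도시 출발 항공표가 있을 때 다음 도시 pop해서 스택에 추가
--             stack.append(node_dict[now_city].pop())
--     # 역순이므로 다시 정렬
--     answer.reverse()
--     return answer
-- ===== SOURCE B (Python) =====
-- def solution(tickets):
--     # Sort all tickets once (descending); grouping then yields each source's
--     # destinations already in descending order, so no per-key sort pass is needed.
--     graph = {}
--     for t in sorted(tickets, reverse=True):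
--         graph.setdefault(t[0], []).append(t[1])
--
--     route = []
--
--     # recursive Hierholzer: consume the last (lexicographically smallest) remaining
--     # destination; record a city once it has no outgoing tickets left
--     def visit(city):
--         while graph.get(city):
--             visit(graph[city].pop())
--         route.append(city)
--
--     visit("ICN")
--     return route[::-1]
-- ===== Notes on version B (the rewrite author's own statement) =====
-- stated objective: alternative
-- what changed: B sorts the whole ticket list once in descending order and groups it with setdefault/append (so A's build pass and per-key sorted() pass collapse into one global sort), then walks the graph with a recursive visit helper instead of A's explicit while-stack loop.
import Mathlib
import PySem

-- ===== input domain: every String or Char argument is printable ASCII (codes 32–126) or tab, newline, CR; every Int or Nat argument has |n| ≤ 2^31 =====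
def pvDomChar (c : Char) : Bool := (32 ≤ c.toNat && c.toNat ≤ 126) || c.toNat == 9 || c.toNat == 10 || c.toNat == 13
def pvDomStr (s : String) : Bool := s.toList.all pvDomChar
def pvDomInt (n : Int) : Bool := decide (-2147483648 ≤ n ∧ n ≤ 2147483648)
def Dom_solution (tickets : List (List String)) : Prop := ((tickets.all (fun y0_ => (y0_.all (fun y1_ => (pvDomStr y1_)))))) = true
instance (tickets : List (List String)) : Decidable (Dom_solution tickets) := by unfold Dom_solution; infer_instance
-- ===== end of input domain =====

-- B replaces A's build-then-sort-each-list passes by ONE global descending sort of the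
-- tickets followed by grouping, and replaces A's iterative stack loop by a recursive visit.

-- total number of remaining tickets in the dict; only used as a fuel bound making both loops total
def pvEsize (d : PySem.Dict String (List String)) : Nat :=
  (d.items.map (fun p => p.2.length)).sum

-- ===== PORT A =====
-- the while-stack loop of A; fuel only makes it total (2*edges+2 always suffices).
-- `node_dict[now_city].pop()` on the (nonempty) list l is exactly (l.getLast?, l.dropLast).
def pvLoopA (fuel : Nat) (d : PySem.Dict String (List String))
    (stack : List String) (answer : List String) : List String :=
  match fuel with
  | 0 => answer.reverse
  | fuel + 1 =>
    match stack with
    | [] => answer.reverse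
    | now_city :: rest =>
      if d.contains now_city = false ∨ d.getD now_city [] = [] then
        pvLoopA fuel d rest (answer ++ [now_city])
      else
        let l := d.getD now_city []
        pvLoopA fuel (d.insert now_city l.dropLast) ((l.getLast?.getD "") :: now_city :: rest) answer

def solution (tickets : List (List String)) : List String :=
  let node_dict :=
    tickets.foldl (fun d city =>
      d.insert (PySem.List.pyGetD city 0 "")
        (d.getD (PySem.List.pyGetD city 0 "") [] ++ [PySem.List.pyGetD city 1 ""]))
      PySem.Dict.empty
  let node_dict :=
    node_dict.keys.foldl (fun d city =>
      d.insert city (PySem.List.sorted (d.getD city []) (fun x => x) true)) node_dict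
  pvLoopA (2 * pvEsize node_dict + 2) node_dict ["ICN"] []

-- ===== PORT B =====
-- B's recursive visit: while graph.get(city): visit(graph[city].pop()); route.append(city).
-- fuel only makes it total (edges+1 always suffices); pop() of the nonempty l = (l.getLast?, l.dropLast).
def pvVisit (fuel : Nat) (g : PySem.Dict String (List String))
    (city : String) (route : List String) : PySem.Dict String (List String) × List String :=
  match fuel with
  | 0 => (g, route ++ [city])
  | fuel + 1 =>
    if g.getD city [] = [] then (g, route ++ [city])
    else
      let l := g.getD city []
      let p := pvVisit fuel (g.insert city l.dropLast) (l.getLast?.getD "") route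
      pvVisit fuel p.1 city p.2

-- graph.setdefault(t[0], []).append(t[1]) is Dict.modify t[0] [] (· ++ [t[1]]);
-- route[::-1] is List.reverse (PySem.List.slice?_none_none_neg_one).
def solution_alt (tickets : List (List String)) : List String :=
  let graph :=
    (PySem.List.sorted tickets (fun x => x) true).foldl
      (fun g t =>
        g.modify (PySem.List.pyGetD t 0 "") [] (fun ds => ds ++ [PySem.List.pyGetD t 1 ""]))
      PySem.Dict.empty
  ((pvVisit (pvEsize graph + 1) graph "ICN" []).2).reverse

-- ===== PRECONDITION & SPEC =====
-- Python A evaluates city[0] and city[1] for every ticket, raising IndexError on a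
-- ticket of length < 2; Pre_ excludes exactly those inputs.
def Pre_solution (tickets : List (List String)) : Prop :=
  ∀ t ∈ tickets, 2 ≤ t.length
instance (tickets : List (List String)) : Decidable (Pre_solution tickets) := by
  unfold Pre_solution; infer_instance

def pvWitness_solution : List (List String) := [["ICN", "AAA"], ["AAA", "ICN"]]

def Spec_solution (tickets : List (List String)) (out : List String) : Prop := out = solution_alt tickets
instance (tickets : List (List String)) (out : List String) : Decidable (Spec_solution tickets out) := by unfold Spec_solution; infer_instance

-- ===== CLAIM (what is proved, stated in full; the proofs are below) =====
def Claim_equal_solution : Prop := ∀ (tickets : List (List String)), Dom_solution tickets → Pre_solution tickets → Spec_solution tickets (solution tickets)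

-- ===== LEMMAS AND PROOFS =====

-- destinations of tickets leaving k, in ticket order
def pvCollect (ts : List (List String)) (k : String) : List String :=
  ((ts.map (fun t => (PySem.List.pyGetD t 0 "", PySem.List.pyGetD t 1 ""))).filter
    (fun p => p.1 == k)).map (·.2)

-- replacing the (unique) value at key k by v changes the ticket count by the length difference
lemma pv_sum_map_update (l : List (String × List String)) (k : String) (v lv : List String)
    (hmem : (k, lv) ∈ l) (hnd : (l.map Prod.fst).Nodup) :
    ((l.map (fun p => if p.1 == k then (k, v) else p)).map (fun p => p.2.length)).sum + lv.length
      = (l.map (fun p => p.2.length)).sum + v.length := by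
  induction l with
  | nil => cases hmem
  | cons p t ih =>
    simp only [List.map_cons, List.nodup_cons, List.mem_map] at hnd
    obtain ⟨hhead, hnd'⟩ := hnd
    rcases List.mem_cons.mp hmem with h1 | h1
    · obtain rfl : p = (k, lv) := h1.symm
      have ht : ∀ q ∈ t, (fun p => if p.1 == k then (k, v) else p) q = (fun q => q) q := by
        intro q hq
        have hqk : q.1 ≠ k := by
          intro e
          exact hhead ⟨q, hq, e⟩
        simp [hqk]
      simp only [List.map_cons, List.sum_cons]
      rw [List.map_congr_left ht]
      simp
      omega
    · have hk : p.1 ≠ k := by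
        intro e
        exact hhead ⟨(k, lv), h1, e.symm⟩
      simp only [List.map_cons, List.sum_cons]
      rw [if_neg (by simpa using hk)]
      have := ih h1 hnd'
      omega

lemma pv_esize_insert (d : PySem.Dict String (List String)) (k : String)
    (hnd : d.keys.Nodup) (h : d.getD k [] ≠ []) :
    pvEsize (d.insert k (d.getD k []).dropLast) + 1 = pvEsize d := by
  have hc : d.contains k = true := by
    by_contra hc'
    have hc2 : d.contains k = false := by
      cases hcv : d.contains k
      · rfl
      · exact absurd hcv hc'
    exact h (PySem.Dict.getD_of_not_contains _ [] hc2)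
  obtain ⟨l, hl⟩ : ∃ l, d.get? k = some l := by
    have := PySem.Dict.contains_eq_isSome_get? (d := d) (k := k)
    rw [hc] at this
    exact Option.isSome_iff_exists.mp this.symm
  have hgd : d.getD k [] = l := PySem.Dict.getD_of_get?_eq_some _ [] hl
  have hmem : (k, l) ∈ d.items := PySem.Dict.mem_items_of_get?_eq_some _ hl
  have hnd' : (d.items.map Prod.fst).Nodup := hnd
  have hlen : l ≠ [] := by rw [hgd] at h; exact h
  have hkey := pv_sum_map_update d.items k (d.getD k []).dropLast l hmem hnd'
  unfold pvEsize
  rw [PySem.Dict.items_insert_of_contains d _ hc]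
  have hdl : (d.getD k []).dropLast.length = l.length - 1 := by
    rw [hgd]; exact List.length_dropLast
  have hlpos : 1 ≤ l.length := by
    cases l
    · exact absurd rfl hlen
    · simp
  omega

-- visit keeps the key set and never adds tickets
lemma pv_visit_keys_esize (fuel : Nat) :
    ∀ (d : PySem.Dict String (List String)) (c : String) (a : List String),
      d.keys.Nodup →
      (pvVisit fuel d c a).1.keys = d.keys ∧ pvEsize (pvVisit fuel d c a).1 ≤ pvEsize d := by
  induction fuel with
  | zero => intro d c a _; simp [pvVisit]
  | succ f ih =>
    intro d c a hnd
    by_cases h : d.getD c [] = []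
    · simp [pvVisit, h]
    · have hc : d.contains c = true := by
        cases hcv : d.contains c
        · exact absurd (PySem.Dict.getD_of_not_contains d [] hcv) h
        · rfl
      have hk2 : (d.insert c (d.getD c []).dropLast).keys = d.keys :=
        PySem.Dict.keys_insert_of_contains d _ hc
      have hnd2 : (d.insert c (d.getD c []).dropLast).keys.Nodup := by rw [hk2]; exact hnd
      have he2 : pvEsize (d.insert c (d.getD c []).dropLast) + 1 = pvEsize d :=
        pv_esize_insert d c hnd h
      obtain ⟨hk3, he3⟩ :=
        ih (d.insert c (d.getD c []).dropLast) ((d.getD c []).getLast?.getD "") a hnd2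
      obtain ⟨hk4, he4⟩ :=
        ih (pvVisit f (d.insert c (d.getD c []).dropLast) ((d.getD c []).getLast?.getD "") a).1 c
           (pvVisit f (d.insert c (d.getD c []).dropLast) ((d.getD c []).getLast?.getD "") a).2
           (by rw [hk3]; exact hnd2)
      simp only [pvVisit, if_neg h]
      constructor
      · rw [hk4, hk3, hk2]
      · omega

-- a dict with no tickets left answers [] everywhere
lemma pv_getD_esize_zero (d : PySem.Dict String (List String)) (c : String)
    (h : pvEsize d = 0) : d.getD c [] = [] := by
  cases hcv : d.contains c
  · exact PySem.Dict.getD_of_not_contains d [] hcv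
  · obtain ⟨l, hl⟩ : ∃ l, d.get? c = some l := by
      have := PySem.Dict.contains_eq_isSome_get? d c
      rw [hcv] at this
      exact Option.isSome_iff_exists.mp this.symm
    have hmem : (c, l) ∈ d.items := PySem.Dict.mem_items_of_get?_eq_some _ hl
    have hle : l.length ≤ pvEsize d := by
      unfold pvEsize
      exact List.single_le_sum (by simp) _ (List.mem_map.mpr ⟨(c, l), hmem, rfl⟩)
    have : l = [] := List.eq_nil_of_length_eq_zero (by omega)
    rw [PySem.Dict.getD_of_get?_eq_some _ [] hl, this]

-- fuel irrelevance for pvVisit once fuel exceeds the ticket count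
lemma pv_visit_irrel (n : Nat) :
    ∀ (d : PySem.Dict String (List String)), d.keys.Nodup → pvEsize d ≤ n →
    ∀ (c : String) (a : List String) (f g : Nat), pvEsize d < f → pvEsize d < g →
      pvVisit f d c a = pvVisit g d c a := by
  induction n with
  | zero =>
    intro d hnd hle c a f g hf hg
    obtain ⟨f', rfl⟩ : ∃ f', f = f' + 1 := ⟨f - 1, by omega⟩
    obtain ⟨g', rfl⟩ : ∃ g', g = g' + 1 := ⟨g - 1, by omega⟩
    have h := pv_getD_esize_zero d c (Nat.le_zero.mp hle)
    simp [pvVisit, h]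
  | succ n ih =>
    intro d hnd hle c a f g hf hg
    obtain ⟨f', rfl⟩ : ∃ f', f = f' + 1 := ⟨f - 1, by omega⟩
    obtain ⟨g', rfl⟩ : ∃ g', g = g' + 1 := ⟨g - 1, by omega⟩
    by_cases h : d.getD c [] = []
    · simp [pvVisit, h]
    · have hc : d.contains c = true := by
        cases hcv : d.contains c
        · exact absurd (PySem.Dict.getD_of_not_contains d [] hcv) h
        · rfl
      have hk2 : (d.insert c (d.getD c []).dropLast).keys = d.keys :=
        PySem.Dict.keys_insert_of_contains d _ hc
      have hnd2 : (d.insert c (d.getD c []).dropLast).keys.Nodup := by rw [hk2]; exact hnd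
      have he2 : pvEsize (d.insert c (d.getD c []).dropLast) + 1 = pvEsize d :=
        pv_esize_insert d c hnd h
      have h1 : pvVisit f' (d.insert c (d.getD c []).dropLast) ((d.getD c []).getLast?.getD "") a
          = pvVisit g' (d.insert c (d.getD c []).dropLast) ((d.getD c []).getLast?.getD "") a :=
        ih _ hnd2 (by omega) _ _ f' g' (by omega) (by omega)
      obtain ⟨hk3, he3⟩ :=
        pv_visit_keys_esize g' (d.insert c (d.getD c []).dropLast) ((d.getD c []).getLast?.getD "") a hnd2
      have h2 : pvVisit f'
            (pvVisit g' (d.insert c (d.getD c []).dropLast) ((d.getD c []).getLast?.getD "") a).1 c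
            (pvVisit g' (d.insert c (d.getD c []).dropLast) ((d.getD c []).getLast?.getD "") a).2
          = pvVisit g'
            (pvVisit g' (d.insert c (d.getD c []).dropLast) ((d.getD c []).getLast?.getD "") a).1 c
            (pvVisit g' (d.insert c (d.getD c []).dropLast) ((d.getD c []).getLast?.getD "") a).2 :=
        ih _ (by rw [hk3]; exact hnd2) (by omega) _ _ f' g' (by omega) (by omega)
      simp only [pvVisit, if_neg h]
      rw [h1, h2]

-- the key step: one stack-top of A's loop is one visit call of B
lemma pv_key (n : Nat) :
    ∀ (d : PySem.Dict String (List String)), d.keys.Nodup → pvEsize d ≤ n →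
    ∀ (top : String) (rest ans : List String),
      pvLoopA (2 * pvEsize d + (top :: rest).length + 1) d (top :: rest) ans
        = pvLoopA (2 * pvEsize (pvVisit (pvEsize d + 1) d top ans).1 + rest.length + 1)
            (pvVisit (pvEsize d + 1) d top ans).1 rest (pvVisit (pvEsize d + 1) d top ans).2 := by
  induction n with
  | zero =>
    intro d hnd hle top rest ans
    have h := pv_getD_esize_zero d top (Nat.le_zero.mp hle)
    simp only [pvLoopA, pvVisit, if_pos (Or.inr h), if_pos h, List.length_cons]
    rfl
  | succ n ih =>
    intro d hnd hle top rest ans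
    by_cases h : d.getD top [] = []
    · simp only [pvLoopA, pvVisit, if_pos (Or.inr h), if_pos h, List.length_cons]
      rfl
    · have hcond : ¬(d.contains top = false ∨ d.getD top [] = []) := by
        rintro (h1 | h2)
        · exact h (PySem.Dict.getD_of_not_contains d [] h1)
        · exact h h2
      have hc : d.contains top = true := by
        cases hcv : d.contains top
        · exact absurd (PySem.Dict.getD_of_not_contains d [] hcv) h
        · rfl
      have hk2 : (d.insert top (d.getD top []).dropLast).keys = d.keys :=
        PySem.Dict.keys_insert_of_contains d _ hc
      have hnd2 : (d.insert top (d.getD top []).dropLast).keys.Nodup := by rw [hk2]; exact hnd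
      have he2 : pvEsize (d.insert top (d.getD top []).dropLast) + 1 = pvEsize d :=
        pv_esize_insert d top hnd h
      obtain ⟨hkP, heP⟩ :=
        pv_visit_keys_esize (pvEsize (d.insert top (d.getD top []).dropLast) + 1)
          (d.insert top (d.getD top []).dropLast) ((d.getD top []).getLast?.getD "") ans hnd2
      have hndP :
          (pvVisit (pvEsize (d.insert top (d.getD top []).dropLast) + 1)
            (d.insert top (d.getD top []).dropLast) ((d.getD top []).getLast?.getD "") ans).1.keys.Nodup := by
        rw [hkP]; exact hnd2
      have hP0 : pvVisit (pvEsize d) (d.insert top (d.getD top []).dropLast)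
            ((d.getD top []).getLast?.getD "") ans
          = pvVisit (pvEsize (d.insert top (d.getD top []).dropLast) + 1)
            (d.insert top (d.getD top []).dropLast) ((d.getD top []).getLast?.getD "") ans :=
        pv_visit_irrel (pvEsize (d.insert top (d.getD top []).dropLast)) _ hnd2 le_rfl _ _ _ _
          (by omega) (by omega)
      have hQ0 : pvVisit (pvEsize d)
            (pvVisit (pvEsize (d.insert top (d.getD top []).dropLast) + 1)
              (d.insert top (d.getD top []).dropLast) ((d.getD top []).getLast?.getD "") ans).1 top
            (pvVisit (pvEsize (d.insert top (d.getD top []).dropLast) + 1)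
              (d.insert top (d.getD top []).dropLast) ((d.getD top []).getLast?.getD "") ans).2
          = pvVisit (pvEsize (pvVisit (pvEsize (d.insert top (d.getD top []).dropLast) + 1)
              (d.insert top (d.getD top []).dropLast) ((d.getD top []).getLast?.getD "") ans).1 + 1)
            (pvVisit (pvEsize (d.insert top (d.getD top []).dropLast) + 1)
              (d.insert top (d.getD top []).dropLast) ((d.getD top []).getLast?.getD "") ans).1 top
            (pvVisit (pvEsize (d.insert top (d.getD top []).dropLast) + 1)
              (d.insert top (d.getD top []).dropLast) ((d.getD top []).getLast?.getD "") ans).2 :=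
        pv_visit_irrel _ _ hndP le_rfl _ _ _ _ (by omega) (by omega)
      have hR : pvVisit (pvEsize d + 1) d top ans
          = pvVisit (pvEsize (pvVisit (pvEsize (d.insert top (d.getD top []).dropLast) + 1)
              (d.insert top (d.getD top []).dropLast) ((d.getD top []).getLast?.getD "") ans).1 + 1)
            (pvVisit (pvEsize (d.insert top (d.getD top []).dropLast) + 1)
              (d.insert top (d.getD top []).dropLast) ((d.getD top []).getLast?.getD "") ans).1 top
            (pvVisit (pvEsize (d.insert top (d.getD top []).dropLast) + 1)
              (d.insert top (d.getD top []).dropLast) ((d.getD top []).getLast?.getD "") ans).2 := by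
        have hunf : pvVisit (pvEsize d + 1) d top ans
            = pvVisit (pvEsize d)
                (pvVisit (pvEsize d) (d.insert top (d.getD top []).dropLast)
                  ((d.getD top []).getLast?.getD "") ans).1 top
                (pvVisit (pvEsize d) (d.insert top (d.getD top []).dropLast)
                  ((d.getD top []).getLast?.getD "") ans).2 := by
          simp only [pvVisit, if_neg h]
        rw [hunf, hP0, hQ0]
      simp only [pvLoopA, if_neg hcond]
      rw [hR]
      rw [show 2 * pvEsize d + (top :: rest).length
            = 2 * pvEsize (d.insert top (d.getD top []).dropLast)
              + ((d.getD top []).getLast?.getD "" :: top :: rest).length + 1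
          from by simp only [List.length_cons]; omega]
      rw [ih _ hnd2 (by omega) _ _ ans]
      rw [ih _ hndP (by omega) top rest _]
      rfl

lemma pv_build_nodup (tickets : List (List String)) :
    ((tickets.foldl (fun d city =>
      d.insert (PySem.List.pyGetD city 0 "")
        (d.getD (PySem.List.pyGetD city 0 "") [] ++ [PySem.List.pyGetD city 1 ""]))
      PySem.Dict.empty : PySem.Dict String (List String))).keys.Nodup := by
  exact PySem.Dict.nodup_keys_foldl_insert_key tickets (fun city => PySem.List.pyGetD city 0 "")
    (fun d city => d.getD (PySem.List.pyGetD city 0 "") [] ++ [PySem.List.pyGetD city 1 ""])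
    PySem.Dict.empty PySem.Dict.nodup_keys_empty

-- getD after the grouping fold (both builds are the same modify-shape fold)
lemma pv_modify_getD (ts : List (List String)) (d : PySem.Dict String (List String)) (k : String) :
    (ts.foldl (fun g t =>
        g.modify (PySem.List.pyGetD t 0 "") [] (fun ds => ds ++ [PySem.List.pyGetD t 1 ""])) d).getD k []
      = d.getD k [] ++ pvCollect ts k := by
  have h : (ts.foldl (fun g t =>
        g.modify (PySem.List.pyGetD t 0 "") [] (fun ds => ds ++ [PySem.List.pyGetD t 1 ""])) d)
      = ((ts.map (fun t => (PySem.List.pyGetD t 0 "", PySem.List.pyGetD t 1 ""))).foldl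
          (fun g p => g.modify p.1 [] (fun ds => ds ++ [p.2])) d) := by
    rw [List.foldl_map]
  rw [h, PySem.Dict.getD_foldl_modify_append]
  rfl


-- A's build fold is the same grouping fold, written with insert instead of modify
lemma pv_build_getD (ts : List (List String)) (k : String) :
    ((ts.foldl (fun d city =>
      d.insert (PySem.List.pyGetD city 0 "")
        (d.getD (PySem.List.pyGetD city 0 "") [] ++ [PySem.List.pyGetD city 1 ""]))
      PySem.Dict.empty : PySem.Dict String (List String))).getD k [] = pvCollect ts k := by
  have h := pv_modify_getD ts PySem.Dict.empty k
  simpa [PySem.Dict.getD_empty] using h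

-- A's second pass: the value at k becomes its descending sort (keys outside ks untouched)
lemma pv_second_getD (ks : List String) (hnd : ks.Nodup) :
    ∀ (d : PySem.Dict String (List String)) (k : String),
    (ks.foldl (fun d city =>
        d.insert city (PySem.List.sorted (d.getD city []) (fun x => x) true)) d).getD k []
      = if k ∈ ks then PySem.List.sorted (d.getD k []) (fun x => x) true else d.getD k [] := by
  induction ks with
  | nil => intro d k; simp
  | cons c0 rest ih =>
    intro d k
    simp only [List.nodup_cons] at hnd
    obtain ⟨hc0, hnd'⟩ := hnd
    simp only [List.foldl_cons]
    rw [ih hnd']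
    by_cases hk : k = c0
    · subst hk
      rw [if_neg hc0, if_pos (List.mem_cons_self ..), PySem.Dict.getD_insert]
      simp
    · rw [PySem.Dict.getD_insert, if_neg hk]
      by_cases hm : k ∈ rest
      · simp [hm]
      · have : k ∉ c0 :: rest := by
          simp [hk, hm]
        simp [hm, this]

-- if no ticket leaves k, nothing is collected for k
lemma pv_collect_nil (ts : List (List String)) (k : String)
    (h : k ∉ ts.map (fun t => PySem.List.pyGetD t 0 "")) : pvCollect ts k = [] := by
  unfold pvCollect
  rw [List.filter_eq_nil_iff.mpr, List.map_nil]
  intro p hp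
  simp only [List.mem_map] at hp
  obtain ⟨t, ht, rfl⟩ := hp
  simp only [beq_iff_eq]
  intro e
  exact h (List.mem_map.mpr ⟨t, ht, e⟩)

-- membership in the keys of A's build
lemma pv_keysA (ts : List (List String)) (k : String) :
    k ∈ ((ts.foldl (fun d city =>
      d.insert (PySem.List.pyGetD city 0 "")
        (d.getD (PySem.List.pyGetD city 0 "") [] ++ [PySem.List.pyGetD city 1 ""]))
      PySem.Dict.empty : PySem.Dict String (List String))).keys
      ↔ k ∈ ts.map (fun t => PySem.List.pyGetD t 0 "") := by
  rw [PySem.Dict.keys_foldl_insert_key]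
  rw [PySem.Set.mem_update]
  simp [PySem.Dict.keys_empty]

-- instance bridges: PySem.List.sorted elaborated at the default LT/DecidableLT instances
-- is the same function as at the LinearOrder-derived ones (needed to cite the order lemmas)
lemma pv_sorted_bridge_L (xs : List (List String)) (rev : Bool) :
    PySem.List.sorted xs (fun x => x) rev
      = @PySem.List.sorted (List String) (List String) List.instLinearOrder.toLT
          LinearOrder.toDecidableLT xs (fun x => x) rev := by
  congr 1

lemma pv_sorted_bridge_S (xs : List String) (rev : Bool) :
    PySem.List.sorted xs (fun x => x) rev
      = @PySem.List.sorted String String String.instLinearOrder.toLT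
          LinearOrder.toDecidableLT xs (fun x => x) rev := by
  congr 1

-- on tickets sharing the first city, the list order gives the order of the second city
lemma pv_head2_le (t u : List String) (ht : 2 ≤ t.length) (hu : 2 ≤ u.length)
    (hk : PySem.List.pyGetD t 0 "" = PySem.List.pyGetD u 0 "") (hle : u ≤ t) :
    PySem.List.pyGetD u 1 "" ≤ PySem.List.pyGetD t 1 "" := by
  obtain ⟨a, b, r, rfl⟩ : ∃ a b r, t = a :: b :: r := by
    match t, ht with
    | a :: b :: r, _ => exact ⟨a, b, r, rfl⟩
  obtain ⟨a', b', r', rfl⟩ : ∃ a b r, u = a :: b :: r := by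
    match u, hu with
    | a :: b :: r, _ => exact ⟨a, b, r, rfl⟩
  have ha : a = a' := by simpa [pysem] using hk
  subst ha
  have hb : b' ≤ b := by
    rcases lt_or_eq_of_le hle with hlt | heq
    · rcases List.cons_lt_cons_iff.mp hlt with h1 | ⟨_, h2⟩
      · exact absurd h1 (lt_irrefl a)
      · rcases List.cons_lt_cons_iff.mp h2 with h3 | ⟨h3, _⟩
        · exact le_of_lt h3
        · exact le_of_eq h3
    · cases heq
      exact le_rfl
  simpa [pysem] using hb

-- the crown: collecting from the globally descending-sorted tickets IS the descending
-- sort of the collected destinations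
lemma pv_collect_sorted (tickets : List (List String))
    (hpre : ∀ t ∈ tickets, 2 ≤ t.length) (k : String) :
    pvCollect (PySem.List.sorted tickets (fun x => x) true) k
      = PySem.List.sorted (pvCollect tickets k) (fun x => x) true := by
  have hperm0 : (PySem.List.sorted tickets (fun x => x) true).Perm tickets :=
    PySem.List.sorted_perm tickets (fun x => x) true
  have hmemS : ∀ t ∈ PySem.List.sorted tickets (fun x => x) true, t ∈ tickets :=
    fun t h => hperm0.mem_iff.mp h
  -- rewrite both collects through filter_map
  have hcf : ∀ (zs : List (List String)),
      pvCollect zs k = (zs.filter (fun t => PySem.List.pyGetD t 0 "" == k)).map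
        (fun t => PySem.List.pyGetD t 1 "") := by
    intro zs
    unfold pvCollect
    rw [List.filter_map, List.map_map]
    rfl
  rw [hcf, hcf]
  -- both sides are permutations of the same list
  have hperm : ((PySem.List.sorted tickets (fun x => x) true).filter
        (fun t => PySem.List.pyGetD t 0 "" == k)).map (fun t => PySem.List.pyGetD t 1 "")
      |>.Perm (PySem.List.sorted ((tickets.filter (fun t => PySem.List.pyGetD t 0 "" == k)).map
        (fun t => PySem.List.pyGetD t 1 "")) (fun x => x) true) := by
    have h1 := (hperm0.filter (fun t => PySem.List.pyGetD t 0 "" == k)).map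
      (fun t => PySem.List.pyGetD t 1 "")
    have h2 := PySem.List.sorted_perm ((tickets.filter (fun t => PySem.List.pyGetD t 0 "" == k)).map
      (fun t => PySem.List.pyGetD t 1 "")) (fun x => x) true
    exact h1.trans h2.symm
  -- both sides are nonincreasing
  have hsorted1 : ((PySem.List.sorted tickets (fun x => x) true).filter
        (fun t => PySem.List.pyGetD t 0 "" == k)).map (fun t => PySem.List.pyGetD t 1 "")
      |>.Pairwise (fun a b => b ≤ a) := by
    have hp : (PySem.List.sorted tickets (fun x => x) true).Pairwise (fun a b => b ≤ a) := by
      rw [pv_sorted_bridge_L]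
      exact PySem.List.sorted_pairwise_rev tickets (fun x => x)
    have hpf := hp.filter (fun t => PySem.List.pyGetD t 0 "" == k)
    rw [List.pairwise_map]
    refine hpf.imp_of_mem ?_
    intro t u htm hum hle
    have htk : PySem.List.pyGetD t 0 "" = k := by
      simpa using (List.mem_filter.mp htm).2
    have huk : PySem.List.pyGetD u 0 "" = k := by
      simpa using (List.mem_filter.mp hum).2
    exact pv_head2_le t u (hpre t (hmemS t (List.mem_filter.mp htm).1))
      (hpre u (hmemS u (List.mem_filter.mp hum).1)) (htk.trans huk.symm) hle
  have hsorted2 : (PySem.List.sorted ((tickets.filter (fun t => PySem.List.pyGetD t 0 "" == k)).map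
        (fun t => PySem.List.pyGetD t 1 "")) (fun x => x) true).Pairwise (fun a b => b ≤ a) := by
    rw [pv_sorted_bridge_S]
    exact PySem.List.sorted_pairwise_rev _ (fun x => x)
  exact List.Perm.eq_of_pairwise (fun a b _ _ h1 h2 => le_antisymm h2 h1) hsorted1 hsorted2 hperm

-- the two final dicts agree on every lookup
lemma pv_rel (tickets : List (List String)) (hpre : ∀ t ∈ tickets, 2 ≤ t.length) (k : String) :
    (((tickets.foldl (fun d city =>
        d.insert (PySem.List.pyGetD city 0 "")
          (d.getD (PySem.List.pyGetD city 0 "") [] ++ [PySem.List.pyGetD city 1 ""]))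
        PySem.Dict.empty : PySem.Dict String (List String))).keys.foldl (fun d city =>
        d.insert city (PySem.List.sorted (d.getD city []) (fun x => x) true))
        (tickets.foldl (fun d city =>
          d.insert (PySem.List.pyGetD city 0 "")
            (d.getD (PySem.List.pyGetD city 0 "") [] ++ [PySem.List.pyGetD city 1 ""]))
          PySem.Dict.empty)).getD k []
      = (((PySem.List.sorted tickets (fun x => x) true).foldl (fun g t =>
          g.modify (PySem.List.pyGetD t 0 "") [] (fun ds => ds ++ [PySem.List.pyGetD t 1 ""]))
          PySem.Dict.empty : PySem.Dict String (List String))).getD k [] := by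
  have hR : (((PySem.List.sorted tickets (fun x => x) true).foldl (fun g t =>
          g.modify (PySem.List.pyGetD t 0 "") [] (fun ds => ds ++ [PySem.List.pyGetD t 1 ""]))
          PySem.Dict.empty : PySem.Dict String (List String))).getD k []
      = PySem.List.sorted (pvCollect tickets k) (fun x => x) true := by
    have h := pv_modify_getD (PySem.List.sorted tickets (fun x => x) true) PySem.Dict.empty k
    rw [PySem.Dict.getD_empty] at h
    rw [h, List.nil_append, pv_collect_sorted tickets hpre k]
  rw [hR, pv_second_getD _ (pv_build_nodup tickets)]
  by_cases hm : k ∈ ((tickets.foldl (fun d city =>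
      d.insert (PySem.List.pyGetD city 0 "")
        (d.getD (PySem.List.pyGetD city 0 "") [] ++ [PySem.List.pyGetD city 1 ""]))
      PySem.Dict.empty : PySem.Dict String (List String))).keys
  · rw [if_pos hm, pv_build_getD]
  · rw [if_neg hm, pv_build_getD]
    have hnm : k ∉ tickets.map (fun t => PySem.List.pyGetD t 0 "") := fun h => hm ((pv_keysA tickets k).mpr h)
    rw [pv_collect_nil tickets k hnm]
    rfl

-- visit computes the same route on pointwise-equal dicts, preserving the pointwise equality
lemma pv_visit_rel (fuel : Nat) :
    ∀ (dA dB : PySem.Dict String (List String)) (c : String) (a : List String),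
      (∀ k, dA.getD k [] = dB.getD k []) →
      (pvVisit fuel dA c a).2 = (pvVisit fuel dB c a).2 ∧
        (∀ k, (pvVisit fuel dA c a).1.getD k [] = (pvVisit fuel dB c a).1.getD k []) := by
  induction fuel with
  | zero => intro dA dB c a hrel; exact ⟨rfl, hrel⟩
  | succ f ih =>
    intro dA dB c a hrel
    by_cases h : dA.getD c [] = []
    · have h' : dB.getD c [] = [] := (hrel c).symm.trans h
      have e1 : pvVisit (f + 1) dA c a = (dA, a ++ [c]) := by simp [pvVisit, h]
      have e2 : pvVisit (f + 1) dB c a = (dB, a ++ [c]) := by simp [pvVisit, h']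
      rw [e1, e2]
      exact ⟨rfl, hrel⟩
    · have h' : dB.getD c [] ≠ [] := fun e => h ((hrel c).trans e)
      have hrel2 : ∀ k, (dA.insert c (dA.getD c []).dropLast).getD k []
          = (dB.insert c (dB.getD c []).dropLast).getD k [] := by
        intro k
        rw [PySem.Dict.getD_insert, PySem.Dict.getD_insert, hrel c]
        by_cases hk : k = c
        · simp [hk]
        · simp [hk, hrel k]
      rw [hrel c] at hrel2
      have e1 : pvVisit (f + 1) dA c a
          = pvVisit f (pvVisit f (dA.insert c (dA.getD c []).dropLast)
              ((dA.getD c []).getLast?.getD "") a).1 c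
              (pvVisit f (dA.insert c (dA.getD c []).dropLast)
                ((dA.getD c []).getLast?.getD "") a).2 := by
        simp only [pvVisit, if_neg h]
      have e2 : pvVisit (f + 1) dB c a
          = pvVisit f (pvVisit f (dB.insert c (dB.getD c []).dropLast)
              ((dB.getD c []).getLast?.getD "") a).1 c
              (pvVisit f (dB.insert c (dB.getD c []).dropLast)
                ((dB.getD c []).getLast?.getD "") a).2 := by
        simp only [pvVisit, if_neg h']
      rw [e1, e2, hrel c]
      obtain ⟨ha1, hrel3⟩ :=
        ih (dA.insert c (dB.getD c []).dropLast) (dB.insert c (dB.getD c []).dropLast)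
          ((dB.getD c []).getLast?.getD "") a hrel2
      rw [ha1]
      exact ih _ _ c _ hrel3

-- nodup keys of B's build
lemma pv_buildB_nodup (tickets : List (List String)) :
    (((PySem.List.sorted tickets (fun x => x) true).foldl (fun g t =>
        g.modify (PySem.List.pyGetD t 0 "") [] (fun ds => ds ++ [PySem.List.pyGetD t 1 ""]))
        PySem.Dict.empty : PySem.Dict String (List String))).keys.Nodup :=
  PySem.Dict.nodup_keys_foldl_modify_key (PySem.List.sorted tickets (fun x => x) true)
    (fun t => PySem.List.pyGetD t 0 "") []
    (fun _ t => fun ds => ds ++ [PySem.List.pyGetD t 1 ""]) PySem.Dict.empty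
    PySem.Dict.nodup_keys_empty

-- ===== VERDICT (by name: the statement is the Claim_ definition above) =====
theorem solution_spec : Claim_equal_solution := by
  intro tickets _ hpre
  show solution tickets = solution_alt tickets
  simp only [solution, solution_alt]
  have hnd1 := pv_build_nodup tickets
  have hndA :
      (((tickets.foldl (fun d city =>
          d.insert (PySem.List.pyGetD city 0 "")
            (d.getD (PySem.List.pyGetD city 0 "") [] ++ [PySem.List.pyGetD city 1 ""]))
          PySem.Dict.empty : PySem.Dict String (List String))).keys.foldl (fun d city =>
          d.insert city (PySem.List.sorted (d.getD city []) (fun x => x) true))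
          (tickets.foldl (fun d city =>
            d.insert (PySem.List.pyGetD city 0 "")
              (d.getD (PySem.List.pyGetD city 0 "") [] ++ [PySem.List.pyGetD city 1 ""]))
            PySem.Dict.empty)).keys.Nodup :=
    PySem.Dict.nodup_keys_foldl_insert _ _ _ hnd1
  have hrel := pv_rel tickets hpre
  have hndB := pv_buildB_nodup tickets
  -- abbreviate the two dicts
  generalize hA : (((tickets.foldl (fun d city =>
      d.insert (PySem.List.pyGetD city 0 "")
        (d.getD (PySem.List.pyGetD city 0 "") [] ++ [PySem.List.pyGetD city 1 ""]))
      PySem.Dict.empty : PySem.Dict String (List String))).keys.foldl (fun d city =>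
      d.insert city (PySem.List.sorted (d.getD city []) (fun x => x) true))
      (tickets.foldl (fun d city =>
        d.insert (PySem.List.pyGetD city 0 "")
          (d.getD (PySem.List.pyGetD city 0 "") [] ++ [PySem.List.pyGetD city 1 ""]))
        PySem.Dict.empty)) = dA at hndA hrel ⊢
  generalize hB : (((PySem.List.sorted tickets (fun x => x) true).foldl (fun g t =>
      g.modify (PySem.List.pyGetD t 0 "") [] (fun ds => ds ++ [PySem.List.pyGetD t 1 ""]))
      PySem.Dict.empty : PySem.Dict String (List String))) = dB at hndB hrel ⊢
  -- A's stack loop = recursive visit on dA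
  have hkey := pv_key (pvEsize dA) dA hndA le_rfl "ICN" [] []
  have hfuel : 2 * pvEsize dA + 2
      = 2 * pvEsize dA + ([("ICN" : String)] : List String).length + 1 := by simp
  rw [hfuel, hkey]
  have hloop : ∀ (d : PySem.Dict String (List String)) (m : Nat) (ans : List String),
      pvLoopA (m + 1) d [] ans = ans.reverse := by
    intro d m ans
    simp [pvLoopA]
  rw [hloop]
  -- align the fuels and apply the pointwise relation
  have hFA : pvVisit (pvEsize dA + 1) dA "ICN" []
      = pvVisit (max (pvEsize dA) (pvEsize dB) + 1) dA "ICN" [] :=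
    pv_visit_irrel (pvEsize dA) dA hndA le_rfl _ _ _ _ (by omega) (by omega)
  have hFB : pvVisit (pvEsize dB + 1) dB "ICN" []
      = pvVisit (max (pvEsize dA) (pvEsize dB) + 1) dB "ICN" [] :=
    pv_visit_irrel (pvEsize dB) dB hndB le_rfl _ _ _ _ (by omega) (by omega)
  rw [hFA, hFB]
  obtain ⟨hout, _⟩ :=
    pv_visit_rel (max (pvEsize dA) (pvEsize dB) + 1) dA dB "ICN" [] hrel
  rw [hout]
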